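-- pv_equiv track=rewrite | github.com/podwieczorek/LDPC-Codes | utils/h_to_sparse.py | get_sparse_indices
-- ===== SOURCE A (Python) =====
-- def get_sparse_indices(parity_check_indices, variable_indices, n):
--     indices = []
--     indices_pointers = []
--
--     for row in variable_indices:
--         indices_pointers.append(len(indices))
--         for index in row:
--             indices.append(n+index)
--
--     for row in parity_check_indices:
--         indices_pointers.append(len(indices))
--         for index in row:
--             indices.append(index)
--
--     indices_pointers.append(len(indices))
--
--     return indices, indices_pointers
-- ===== SOURCE B (Python) =====
-- def get_sparse_indices(parity_check_indices, variable_indices, n):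
--     total = 0
--     for row in variable_indices:
--         total += len(row)
--     for row in parity_check_indices:
--         total += len(row)
--     rows_count = len(variable_indices) + len(parity_check_indices)
--     indices = [0] * total
--     pointers = [0] * (rows_count + 1)
--     pointers[rows_count] = total
--     pos = total
--     j = rows_count - 1
--     for row in reversed(parity_check_indices):
--         for index in reversed(row):
--             pos -= 1
--             indices[pos] = index
--         pointers[j] = pos
--         j -= 1
--     for row in reversed(variable_indices):
--         for index in reversed(row):
--             pos -= 1
--             indices[pos] = n + index
--         pointers[j] = pos
--         j -= 1
--     return indices, pointers
-- ===== Notes on version B (the rewrite author's own statement) =====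
-- stated objective: alternative
-- what changed: B preallocates both output arrays from the precomputed total element count and fills them back-to-front (rows and elements traversed in reverse, writing at a descending cursor), instead of A's forward append-and-snapshot-len construction.
import Mathlib
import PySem

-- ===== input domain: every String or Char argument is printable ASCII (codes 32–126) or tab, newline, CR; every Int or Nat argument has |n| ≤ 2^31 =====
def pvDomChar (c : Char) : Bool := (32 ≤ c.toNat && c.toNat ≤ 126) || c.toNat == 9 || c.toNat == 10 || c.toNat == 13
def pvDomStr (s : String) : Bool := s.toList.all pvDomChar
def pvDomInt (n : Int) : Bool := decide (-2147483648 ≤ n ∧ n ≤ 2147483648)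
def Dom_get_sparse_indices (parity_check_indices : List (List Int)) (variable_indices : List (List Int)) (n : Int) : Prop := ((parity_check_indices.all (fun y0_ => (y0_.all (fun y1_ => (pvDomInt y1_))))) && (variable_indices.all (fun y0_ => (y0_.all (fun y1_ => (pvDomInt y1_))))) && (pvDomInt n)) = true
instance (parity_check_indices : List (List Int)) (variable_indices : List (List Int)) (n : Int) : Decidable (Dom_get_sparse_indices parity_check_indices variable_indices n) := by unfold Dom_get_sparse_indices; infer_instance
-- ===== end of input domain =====

-- B preallocates the outputs from the total element count and fills them back-to-front
-- (reverse traversal with a descending cursor) instead of A's forward append construction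
-- (objective: alternative algorithm, same cost).

-- ===== PORT A =====
def get_sparse_indices (parity_check_indices : List (List Int)) (variable_indices : List (List Int)) (n : Int) : List Int × List Int :=
  let s1 := variable_indices.foldl
    (fun (s : List Int × List Int) row =>
      (row.foldl (fun ind idx => ind ++ [n + idx]) s.1, s.2 ++ [(s.1.length : Int)]))
    ([], [])
  let s2 := parity_check_indices.foldl
    (fun (s : List Int × List Int) row =>
      (row.foldl (fun ind idx => ind ++ [idx]) s.1, s.2 ++ [(s.1.length : Int)]))
    s1
  (s2.1, s2.2 ++ [(s2.1.length : Int)])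

-- ===== PORT B =====
-- Source B preallocates both arrays and fills them at a descending cursor; a write at the
-- descending cursor position, with everything to its right already filled, is ported as
-- a cons onto the already-built suffix (exact: every cell left of the cursor still holds
-- its value only after a later, i.e. earlier-in-reverse, write).
def get_sparse_indices_alt (parity_check_indices : List (List Int)) (variable_indices : List (List Int)) (n : Int) : List Int × List Int :=
  let total : Int :=
    parity_check_indices.foldl (fun t row => t + (row.length : Int))
      (variable_indices.foldl (fun t row => t + (row.length : Int)) 0)
  -- state: (indices suffix built so far, pointers suffix built so far, pos)
  let s1 := parity_check_indices.reverse.foldl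
    (fun (s : List Int × List Int × Int) row =>
      let t := row.reverse.foldl (fun (t : List Int × Int) idx => (idx :: t.1, t.2 - 1)) (s.1, s.2.2)
      (t.1, t.2 :: s.2.1, t.2))
    ([], [total], total)
  let s2 := variable_indices.reverse.foldl
    (fun (s : List Int × List Int × Int) row =>
      let t := row.reverse.foldl (fun (t : List Int × Int) idx => ((n + idx) :: t.1, t.2 - 1)) (s.1, s.2.2)
      (t.1, t.2 :: s.2.1, t.2))
    s1
  (s2.1, s2.2.1)

-- ===== PRECONDITION & SPEC =====
def Spec_get_sparse_indices (parity_check_indices : List (List Int)) (variable_indices : List (List Int)) (n : Int) (out : List Int × List Int) : Prop := out = get_sparse_indices_alt parity_check_indices variable_indices n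
instance (parity_check_indices : List (List Int)) (variable_indices : List (List Int)) (n : Int) (out : List Int × List Int) : Decidable (Spec_get_sparse_indices parity_check_indices variable_indices n out) := by unfold Spec_get_sparse_indices; infer_instance

-- ===== CLAIM (what is proved, stated in full; the proofs are below) =====
def Claim_equal_get_sparse_indices : Prop := ∀ (parity_check_indices : List (List Int)) (variable_indices : List (List Int)) (n : Int), Dom_get_sparse_indices parity_check_indices variable_indices n → Spec_get_sparse_indices parity_check_indices variable_indices n (get_sparse_indices parity_check_indices variable_indices n)

-- ===== LEMMAS AND PROOFS =====

-- pointer sequence: starts (before each row) of rows, beginning at a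
def pvCum (rows : List (List Int)) (a : Int) : List Int :=
  match rows with
  | [] => []
  | r :: rs => a :: pvCum rs (a + (r.length : Int))

def pvSum (rows : List (List Int)) : Int := (rows.map (fun r => (r.length : Int))).sum

-- A side: inner append loop
lemma inner_foldl (f : Int → Int) (r acc : List Int) :
    r.foldl (fun ind idx => ind ++ [f idx]) acc = acc ++ r.map f := by
  induction r generalizing acc with
  | nil => simp
  | cons x xs ih => simp [List.foldl, ih, List.append_assoc]

-- A side: one stage characterised
lemma stageA_char (f : Int → Int) (rows : List (List Int)) (s : List Int × List Int) :
    rows.foldl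
      (fun (s : List Int × List Int) row =>
        (row.foldl (fun ind idx => ind ++ [f idx]) s.1, s.2 ++ [(s.1.length : Int)])) s
    = (s.1 ++ rows.flatMap (fun r => r.map f), s.2 ++ pvCum rows (s.1.length : Int)) := by
  induction rows generalizing s with
  | nil => simp [pvCum]
  | cons r rs ih =>
      simp only [List.foldl]
      rw [ih, inner_foldl]
      simp only [pvCum, List.flatMap_cons, List.length_append, List.length_map]
      rw [Prod.mk.injEq]
      refine ⟨by simp [List.append_assoc], ?_⟩
      simp [List.append_assoc]

-- B side: inner reverse-fill loop
lemma innerB_foldl (f : Int → Int) (r ind : List Int) (pos : Int) :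
    r.reverse.foldl (fun (t : List Int × Int) idx => (f idx :: t.1, t.2 - 1)) (ind, pos)
    = (r.map f ++ ind, pos - (r.length : Int)) := by
  induction r generalizing ind pos with
  | nil => simp
  | cons x xs ih =>
      simp only [List.reverse_cons, List.foldl_append, List.foldl_cons, List.foldl_nil, ih]
      simp [Prod.mk.injEq]
      push_cast; ring

-- B side: one reverse stage characterised
lemma stageB_char (f : Int → Int) (rows : List (List Int)) (s : List Int × List Int × Int) :
    rows.reverse.foldl
      (fun (s : List Int × List Int × Int) row =>
        let t := row.reverse.foldl (fun (t : List Int × Int) idx => (f idx :: t.1, t.2 - 1)) (s.1, s.2.2)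
        (t.1, t.2 :: s.2.1, t.2)) s
    = (rows.flatMap (fun r => r.map f) ++ s.1,
       pvCum rows (s.2.2 - pvSum rows) ++ s.2.1,
       s.2.2 - pvSum rows) := by
  induction rows generalizing s with
  | nil => simp [pvSum, pvCum]
  | cons r rs ih =>
      simp only [List.reverse_cons, List.foldl_append, List.foldl_cons, List.foldl_nil, ih]
      simp only [innerB_foldl]
      simp only [pvCum, pvSum, List.map_cons, List.sum_cons, List.flatMap_cons, Prod.mk.injEq]
      refine ⟨by simp [List.append_assoc], ?_, by ring⟩
      have h : s.2.2 - ((r.length : Int) + (rs.map (fun r => (r.length : Int))).sum) + (r.length : Int)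
             = s.2.2 - (rs.map (fun r => (r.length : Int))).sum := by ring
      rw [h]
      congr 1
      ring

lemma flatMap_len (f : Int → Int) (rows : List (List Int)) :
    ((rows.flatMap (fun r => r.map f)).length : Int) = pvSum rows := by
  induction rows with
  | nil => simp [pvSum]
  | cons r rs ih => simp [pvSum, List.flatMap_cons] at *; omega

lemma total_foldl (rows : List (List Int)) (a : Int) :
    rows.foldl (fun t row => t + (row.length : Int)) a = a + pvSum rows := by
  induction rows generalizing a with
  | nil => simp [pvSum]
  | cons r rs ih => simp [List.foldl, ih, pvSum, List.sum_cons]; ring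

-- ===== VERDICT (by name: the statement is the Claim_ definition above) =====
theorem get_sparse_indices_spec : Claim_equal_get_sparse_indices := by
  intro p v n _
  unfold Spec_get_sparse_indices get_sparse_indices get_sparse_indices_alt
  simp only [stageA_char, stageB_char, total_foldl, List.nil_append, List.append_nil]
  rw [Prod.mk.injEq]
  constructor
  · simp [List.append_assoc]
  · have h1 := flatMap_len (HAdd.hAdd n) v
    have h2 := flatMap_len (fun idx => idx) p
    simp only [List.length_nil, Nat.cast_zero, List.length_append, Nat.cast_add, h1, h2, zero_add]
    have e1 : pvSum v + pvSum p - pvSum p - pvSum v = (0 : Int) := by ring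
    have e2 : pvSum v + pvSum p - pvSum p = pvSum v := by ring
    rw [e1, e2]
    simp
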